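-- pv_equiv track=rewrite | github.com/vchakrab/DiffDel | exponential_deletion.py | find_inference_paths_str
-- ===== SOURCE A (Python) =====
-- from typing import Any, Dict, List, Set, Tuple, FrozenSet
--
-- def find_inference_paths_str(hyperedges: List[Tuple[str, ...]],
--                              target_cell: str,
--                              initial_known: Set[str] = None) -> List[List[int]]:
--     # ... (find_inference_paths_str remains unchanged)
--     if initial_known is None:
--         raise ValueError("initial_known must be provided")
--
--     all_paths = []
--     seen_paths = set()
--
--     def dfs(known_cells: Set[str], used_edges: Set[int], current_path: List[int],
--             can_assume_known: Set[str]):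
--
--         for edge_idx, edge in enumerate(hyperedges):
--             if edge_idx in used_edges:
--                 continue
--
--             for inferred_cell in edge:
--                 if inferred_cell in known_cells:
--                     continue
--
--                 other_cells = [c for c in edge if c != inferred_cell]
--
--                 if all(c in known_cells for c in other_cells):
--                     new_known = known_cells | {inferred_cell}
--                     new_used = used_edges | {edge_idx}
--                     new_path = current_path + [edge_idx]
--
--                     if inferred_cell == target_cell:
--                         path_tuple = tuple(new_path)
--                         if path_tuple not in seen_paths:
--                             seen_paths.add(path_tuple)
--                             all_paths.append(new_path)
--
--                     dfs(new_known, new_used, new_path, can_assume_known)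
--
--                 elif inferred_cell == target_cell:
--                     unknown_cells = [c for c in other_cells if c not in known_cells]
--                     if all(c in can_assume_known for c in unknown_cells):
--                         new_path = current_path + [edge_idx]
--                         path_tuple = tuple(new_path)
--                         if path_tuple not in seen_paths:
--                             seen_paths.add(path_tuple)
--                             all_paths.append(new_path)
--
--     all_cells = set()
--     for edge in hyperedges:
--         all_cells.update(edge)
--     potentially_inferrable = all_cells - initial_known - {target_cell}
--
--     dfs(initial_known, set(), [], potentially_inferrable)
--     return all_paths
-- ===== SOURCE B (Python) =====
-- def find_inference_paths_str(hyperedges, target_cell, initial_known=None):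
--     if initial_known is None:
--         raise ValueError("initial_known must be provided")
--
--     all_cells = set()
--     for edge in hyperedges:
--         all_cells.update(edge)
--     can_assume_known = all_cells - initial_known - {target_cell}
--
--     all_paths = []
--     seen_paths = set()
--     # iterative DFS: explicit stack of pending items; an item is either a frame
--     # to expand or a path to record, so recording order matches the recursion.
--     stack = [("frame", frozenset(initial_known), frozenset(), [])]
--     while stack:
--         item = stack.pop()
--         if item[0] == "record":
--             path = item[1]
--             t = tuple(path)
--             if t not in seen_paths:
--                 seen_paths.add(t)
--                 all_paths.append(path)
--             continue
--         _, known_cells, used_edges, current_path = item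
--         pending = []
--         for edge_idx, edge in enumerate(hyperedges):
--             if edge_idx in used_edges:
--                 continue
--             for inferred_cell in edge:
--                 if inferred_cell in known_cells:
--                     continue
--                 other_cells = [c for c in edge if c != inferred_cell]
--                 if all(c in known_cells for c in other_cells):
--                     new_path = current_path + [edge_idx]
--                     if inferred_cell == target_cell:
--                         pending.append(("record", new_path))
--                     pending.append(("frame", known_cells | {inferred_cell},
--                                     used_edges | {edge_idx}, new_path))
--                 elif inferred_cell == target_cell:
--                     unknown_cells = [c for c in other_cells if c not in known_cells]
--                     if all(c in can_assume_known for c in unknown_cells):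
--                         pending.append(("record", current_path + [edge_idx]))
--         stack.extend(reversed(pending))
--     return all_paths
-- ===== Notes on version B (the rewrite author's own statement) =====
-- stated objective: alternative
-- what changed: The recursive DFS (nested def dfs with nonlocal accumulators) is replaced by an iterative worklist loop over an explicit stack whose items are either frames to expand or paths pending recording, pushed in reverse so LIFO popping reproduces A's pre-order recording exactly.
import Mathlib
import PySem

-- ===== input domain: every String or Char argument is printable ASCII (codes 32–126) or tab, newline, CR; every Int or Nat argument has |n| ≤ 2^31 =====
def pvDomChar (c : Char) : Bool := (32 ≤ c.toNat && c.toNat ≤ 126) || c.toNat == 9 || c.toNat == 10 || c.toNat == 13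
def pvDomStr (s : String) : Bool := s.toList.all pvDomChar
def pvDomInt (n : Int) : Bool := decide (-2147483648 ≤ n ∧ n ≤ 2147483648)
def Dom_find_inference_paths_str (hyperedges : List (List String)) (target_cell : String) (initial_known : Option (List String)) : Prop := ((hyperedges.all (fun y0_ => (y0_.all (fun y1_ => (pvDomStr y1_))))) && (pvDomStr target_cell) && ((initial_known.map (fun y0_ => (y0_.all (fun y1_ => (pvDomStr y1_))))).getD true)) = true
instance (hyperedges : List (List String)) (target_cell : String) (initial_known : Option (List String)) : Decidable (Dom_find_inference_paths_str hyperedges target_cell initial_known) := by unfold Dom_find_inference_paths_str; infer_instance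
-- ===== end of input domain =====

-- B rewrites A's recursive DFS as an iterative worklist loop over an explicit stack of
-- tagged items (frames to expand / paths to record); same asymptotic cost ("alternative").
-- Note: the fuel arguments of the Lean ports are totality guards only; the proofs show they
-- are never exhausted on the ports' actual top-level calls.

-- ===== PORT A =====
-- recursive dfs of A; fuel (first Nat argument) is a totality guard, shown sufficient below.
-- accumulator = (all_paths, seen_paths); returns none only on fuel exhaustion.
def pvDfsA (hyperedges : List (List String)) (target_cell : String) (can_assume : List String) :
    Nat → List String → List Int → List Int →
    (List (List Int) × List (List Int)) → Option (List (List Int) × List (List Int))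
  | 0, _, _, _, _ => none
  | fa+1, known, used, path, acc =>
    (PySem.List.enumerate hyperedges 0).foldl
      (fun oa ei =>
        if PySem.Set.contains used ei.1 then oa
        else ei.2.foldl
          (fun oa c =>
            oa.bind (fun a =>
              if PySem.Set.contains known c then some a
              else if (ei.2.filter (fun x => !(x == c))).all (fun x => PySem.Set.contains known x) then
                pvDfsA hyperedges target_cell can_assume fa
                  (PySem.Set.add known c) (PySem.Set.add used ei.1) (path ++ [ei.1])
                  (if c == target_cell then
                     (if PySem.Set.contains a.2 (path ++ [ei.1]) then a
                      else (a.1 ++ [path ++ [ei.1]], PySem.Set.add a.2 (path ++ [ei.1])))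
                   else a)
              else if c == target_cell then
                (if ((ei.2.filter (fun x => !(x == c))).filter (fun x => !(PySem.Set.contains known x))).all
                      (fun x => PySem.Set.contains can_assume x) then
                   some (if PySem.Set.contains a.2 (path ++ [ei.1]) then a
                         else (a.1 ++ [path ++ [ei.1]], PySem.Set.add a.2 (path ++ [ei.1])))
                 else some a)
              else some a))
          oa)
      (some acc)

def find_inference_paths_str (hyperedges : List (List String)) (target_cell : String) (initial_known : Option (List String)) : List (List Int) :=
  match initial_known with
  | none => []   -- Python raises ValueError here; excluded by Pre_
  | some ik =>
    match pvDfsA hyperedges target_cell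
        (PySem.Set.diff (PySem.Set.diff (hyperedges.foldl (fun s e => PySem.Set.update s e) PySem.Set.empty) ik) [target_cell])
        (hyperedges.length + 1) (PySem.Set.ofList ik) PySem.Set.empty [] ([], PySem.Set.empty) with
    | some acc => acc.1
    | none => []

-- ===== PORT B =====
-- a stack item: a frame still to expand, or a path whose recording is pending
inductive PVItem where
  | frame (known : List String) (used : List Int) (path : List Int)
  | record (path : List Int)

-- the pending list one popped frame generates (B's inner double loop)
def pvPending (hyperedges : List (List String)) (target_cell : String) (can_assume : List String)
    (known : List String) (used : List Int) (path : List Int) : List PVItem :=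
  (PySem.List.enumerate hyperedges 0).foldl
    (fun l ei =>
      if PySem.Set.contains used ei.1 then l
      else ei.2.foldl
        (fun l c =>
          if PySem.Set.contains known c then l
          else if (ei.2.filter (fun x => !(x == c))).all (fun x => PySem.Set.contains known x) then
            l ++ ((if c == target_cell then [PVItem.record (path ++ [ei.1])] else []) ++
                  [PVItem.frame (PySem.Set.add known c) (PySem.Set.add used ei.1) (path ++ [ei.1])])
          else if c == target_cell then
            (if ((ei.2.filter (fun x => !(x == c))).filter (fun x => !(PySem.Set.contains known x))).all
                  (fun x => PySem.Set.contains can_assume x) then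
               l ++ [PVItem.record (path ++ [ei.1])]
             else l)
          else l)
        l)
    []

-- B's while-loop over the stack (list head = top of stack; pushing the pending list
-- reversed then popping = consuming it front to back). Fuel is a totality guard only.
def pvRun (hyperedges : List (List String)) (target_cell : String) (can_assume : List String) :
    Nat → List PVItem → (List (List Int) × List (List Int)) → Option (List (List Int) × List (List Int))
  | _, [], a => some a
  | 0, _ :: _, _ => none
  | fb+1, PVItem.record p :: rest, a =>
      pvRun hyperedges target_cell can_assume fb rest
        (if PySem.Set.contains a.2 p then a else (a.1 ++ [p], PySem.Set.add a.2 p))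
  | fb+1, PVItem.frame known used path :: rest, a =>
      pvRun hyperedges target_cell can_assume fb
        (pvPending hyperedges target_cell can_assume known used path ++ rest) a

def find_inference_paths_str_alt (hyperedges : List (List String)) (target_cell : String) (initial_known : Option (List String)) : List (List Int) :=
  match initial_known with
  | none => []   -- Python raises ValueError here; excluded by Pre_
  | some ik =>
    match pvRun hyperedges target_cell
        (PySem.Set.diff (PySem.Set.diff (hyperedges.foldl (fun s e => PySem.Set.update s e) PySem.Set.empty) ik) [target_cell])
        ((2 * (hyperedges.map List.length).sum + 2) ^ (hyperedges.length + 1))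
        [PVItem.frame (PySem.Set.ofList ik) PySem.Set.empty []] ([], PySem.Set.empty) with
    | some acc => acc.1
    | none => []

-- ===== PRECONDITION & SPEC =====
-- Pre_ excludes only initial_known = None, on which the Python A raises ValueError.
def Pre_find_inference_paths_str (hyperedges : List (List String)) (target_cell : String) (initial_known : Option (List String)) : Prop := initial_known.isSome = true
instance (hyperedges : List (List String)) (target_cell : String) (initial_known : Option (List String)) : Decidable (Pre_find_inference_paths_str hyperedges target_cell initial_known) := by unfold Pre_find_inference_paths_str; infer_instance
def pvWitness_find_inference_paths_str : List (List String) × String × Option (List String) := ([["a", "b"]], "b", some ["a"])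

def Spec_find_inference_paths_str (hyperedges : List (List String)) (target_cell : String) (initial_known : Option (List String)) (out : List (List Int)) : Prop := out = find_inference_paths_str_alt hyperedges target_cell initial_known
instance (hyperedges : List (List String)) (target_cell : String) (initial_known : Option (List String)) (out : List (List Int)) : Decidable (Spec_find_inference_paths_str hyperedges target_cell initial_known out) := by unfold Spec_find_inference_paths_str; infer_instance

-- ===== CLAIM (what is proved, stated in full; the proofs are below) =====
def Claim_equal_find_inference_paths_str : Prop := ∀ (hyperedges : List (List String)) (target_cell : String) (initial_known : Option (List String)), Dom_find_inference_paths_str hyperedges target_cell initial_known → Pre_find_inference_paths_str hyperedges target_cell initial_known → Spec_find_inference_paths_str hyperedges target_cell initial_known (find_inference_paths_str hyperedges target_cell initial_known)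

-- ===== LEMMAS AND PROOFS =====

-- proof-side view of one (edge,cell) step of A's scan
def pvApplyA (hyperedges : List (List String)) (target_cell : String) (can_assume : List String)
    (fa : Nat) (known : List String) (used : List Int) (path : List Int)
    (ei : Int × List String) (c : String)
    (a : List (List Int) × List (List Int)) : Option (List (List Int) × List (List Int)) :=
  if PySem.Set.contains known c then some a
  else if (ei.2.filter (fun x => !(x == c))).all (fun x => PySem.Set.contains known x) then
    pvDfsA hyperedges target_cell can_assume fa
      (PySem.Set.add known c) (PySem.Set.add used ei.1) (path ++ [ei.1])
      (if c == target_cell then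
         (if PySem.Set.contains a.2 (path ++ [ei.1]) then a
          else (a.1 ++ [path ++ [ei.1]], PySem.Set.add a.2 (path ++ [ei.1])))
       else a)
  else if c == target_cell then
    (if ((ei.2.filter (fun x => !(x == c))).filter (fun x => !(PySem.Set.contains known x))).all
          (fun x => PySem.Set.contains can_assume x) then
       some (if PySem.Set.contains a.2 (path ++ [ei.1]) then a
             else (a.1 ++ [path ++ [ei.1]], PySem.Set.add a.2 (path ++ [ei.1])))
     else some a)
  else some a

-- proof-side view of the items one (edge,cell) step of B's scan appends
def pvItemsFor (target_cell : String) (can_assume : List String)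
    (known : List String) (used : List Int) (path : List Int)
    (ei : Int × List String) (c : String) : List PVItem :=
  if PySem.Set.contains known c then []
  else if (ei.2.filter (fun x => !(x == c))).all (fun x => PySem.Set.contains known x) then
    (if c == target_cell then [PVItem.record (path ++ [ei.1])] else []) ++
    [PVItem.frame (PySem.Set.add known c) (PySem.Set.add used ei.1) (path ++ [ei.1])]
  else if c == target_cell then
    (if ((ei.2.filter (fun x => !(x == c))).filter (fun x => !(PySem.Set.contains known x))).all
          (fun x => PySem.Set.contains can_assume x) then
       [PVItem.record (path ++ [ei.1])]
     else [])
  else []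

theorem pvDfsA_succ (hyperedges : List (List String)) (target_cell : String) (can_assume : List String)
    (fa : Nat) (known : List String) (used : List Int) (path : List Int)
    (acc : List (List Int) × List (List Int)) :
    pvDfsA hyperedges target_cell can_assume (fa+1) known used path acc =
      (PySem.List.enumerate hyperedges 0).foldl
        (fun oa ei =>
          if PySem.Set.contains used ei.1 then oa
          else ei.2.foldl
            (fun oa c => oa.bind (pvApplyA hyperedges target_cell can_assume fa known used path ei c)) oa)
        (some acc) := rfl

theorem pvPending_eq (hyperedges : List (List String)) (target_cell : String) (can_assume : List String)
    (known : List String) (used : List Int) (path : List Int) :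
    pvPending hyperedges target_cell can_assume known used path =
      (PySem.List.enumerate hyperedges 0).flatMap
        (fun ei => if PySem.Set.contains used ei.1 then []
                   else ei.2.flatMap (pvItemsFor target_cell can_assume known used path ei)) := by
  unfold pvPending
  have houter : ∀ (l : List PVItem) (ei : Int × List String),
      (if PySem.Set.contains used ei.1 then l
       else ei.2.foldl
        (fun l c =>
          if PySem.Set.contains known c then l
          else if (ei.2.filter (fun x => !(x == c))).all (fun x => PySem.Set.contains known x) then
            l ++ ((if c == target_cell then [PVItem.record (path ++ [ei.1])] else []) ++
                  [PVItem.frame (PySem.Set.add known c) (PySem.Set.add used ei.1) (path ++ [ei.1])])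
          else if c == target_cell then
            (if ((ei.2.filter (fun x => !(x == c))).filter (fun x => !(PySem.Set.contains known x))).all
                  (fun x => PySem.Set.contains can_assume x) then
               l ++ [PVItem.record (path ++ [ei.1])]
             else l)
          else l)
        l) =
      l ++ (if PySem.Set.contains used ei.1 then []
            else ei.2.flatMap (pvItemsFor target_cell can_assume known used path ei)) := by
    intro l ei
    by_cases hu : PySem.Set.contains used ei.1 = true
    · simp only [if_pos hu]; simp
    · simp only [if_neg hu]
      have hfun : (fun (l : List PVItem) (c : String) =>
          if PySem.Set.contains known c then l
          else if (ei.2.filter (fun x => !(x == c))).all (fun x => PySem.Set.contains known x) then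
            l ++ ((if c == target_cell then [PVItem.record (path ++ [ei.1])] else []) ++
                  [PVItem.frame (PySem.Set.add known c) (PySem.Set.add used ei.1) (path ++ [ei.1])])
          else if c == target_cell then
            (if ((ei.2.filter (fun x => !(x == c))).filter (fun x => !(PySem.Set.contains known x))).all
                  (fun x => PySem.Set.contains can_assume x) then
               l ++ [PVItem.record (path ++ [ei.1])]
             else l)
          else l) =
          (fun (l : List PVItem) (c : String) => l ++ pvItemsFor target_cell can_assume known used path ei c) := by
        funext l c
        unfold pvItemsFor
        split_ifs <;> simp
      rw [hfun, PySem.List.foldl_append_eq_flatMap]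
  have hfun2 : List.foldl (fun (l : List PVItem) (ei : Int × List String) =>
        if PySem.Set.contains used ei.1 then l
        else ei.2.foldl
          (fun l c =>
            if PySem.Set.contains known c then l
            else if (ei.2.filter (fun x => !(x == c))).all (fun x => PySem.Set.contains known x) then
              l ++ ((if c == target_cell then [PVItem.record (path ++ [ei.1])] else []) ++
                    [PVItem.frame (PySem.Set.add known c) (PySem.Set.add used ei.1) (path ++ [ei.1])])
            else if c == target_cell then
              (if ((ei.2.filter (fun x => !(x == c))).filter (fun x => !(PySem.Set.contains known x))).all
                    (fun x => PySem.Set.contains can_assume x) then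
                 l ++ [PVItem.record (path ++ [ei.1])]
               else l)
            else l)
          l) [] (PySem.List.enumerate hyperedges 0) =
      List.foldl (fun (l : List PVItem) (ei : Int × List String) =>
        l ++ (if PySem.Set.contains used ei.1 then []
              else ei.2.flatMap (pvItemsFor target_cell can_assume known used path ei)))
        [] (PySem.List.enumerate hyperedges 0) := by
    apply PySem.List.foldl_congr_mem
    intro acc x _
    exact houter acc x
  rw [hfun2, PySem.List.foldl_append_eq_flatMap]
  simp

theorem pvRun_mono (hyperedges : List (List String)) (target_cell : String) (can_assume : List String) :
    ∀ (f f' : Nat) (items : List PVItem) (a b : List (List Int) × List (List Int)),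
      pvRun hyperedges target_cell can_assume f items a = some b → f ≤ f' →
      pvRun hyperedges target_cell can_assume f' items a = some b := by
  intro f
  induction f with
  | zero =>
    intro f' items a b h _
    cases items with
    | nil => cases f' <;> simpa [pvRun] using h
    | cons x rest => simp [pvRun] at h
  | succ f ih =>
    intro f' items a b h hle
    cases items with
    | nil => cases f' <;> simpa [pvRun] using h
    | cons x rest =>
      obtain ⟨f'', rfl⟩ : ∃ f'', f' = f'' + 1 := ⟨f' - 1, by omega⟩
      cases x with
      | record p => exact ih f'' _ _ _ (by simpa [pvRun] using h) (by omega)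
      | frame k u pth => exact ih f'' _ _ _ (by simpa [pvRun] using h) (by omega)

theorem pvRun_append (hyperedges : List (List String)) (target_cell : String) (can_assume : List String) :
    ∀ (f1 : Nat) (xs : List PVItem) (f2 : Nat) (ys : List PVItem)
      (a b c : List (List Int) × List (List Int)),
      pvRun hyperedges target_cell can_assume f1 xs a = some b →
      pvRun hyperedges target_cell can_assume f2 ys b = some c →
      pvRun hyperedges target_cell can_assume (f1 + f2) (xs ++ ys) a = some c := by
  intro f1
  induction f1 with
  | zero =>
    intro xs f2 ys a b c h1 h2
    cases xs with
    | nil =>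
      simp only [pvRun] at h1
      cases h1
      simpa using pvRun_mono hyperedges target_cell can_assume f2 (0 + f2) ys a c h2 (by omega)
    | cons x rest => simp [pvRun] at h1
  | succ f1 ih =>
    intro xs f2 ys a b c h1 h2
    cases xs with
    | nil =>
      simp only [pvRun] at h1
      cases h1
      exact pvRun_mono hyperedges target_cell can_assume f2 (f1 + 1 + f2) ys a c h2 (by omega)
    | cons x rest =>
      cases x with
      | record p =>
        have h1' := (by simpa [pvRun] using h1 :
          pvRun hyperedges target_cell can_assume f1 rest
            (if PySem.Set.contains a.2 p then a else (a.1 ++ [p], PySem.Set.add a.2 p)) = some b)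
        have := ih rest f2 ys _ b c h1' h2
        simpa [pvRun, Nat.succ_add] using this
      | frame k u pth =>
        have h1' := (by simpa [pvRun] using h1 :
          pvRun hyperedges target_cell can_assume f1
            (pvPending hyperedges target_cell can_assume k u pth ++ rest) a = some b)
        have := ih _ f2 ys _ b c h1' h2
        simpa [pvRun, Nat.succ_add, List.append_assoc] using this

theorem pvRun_nil (hyperedges : List (List String)) (target_cell : String) (can_assume : List String)
    (f : Nat) (a : List (List Int) × List (List Int)) :
    pvRun hyperedges target_cell can_assume f [] a = some a := by
  cases f <;> rfl

theorem pvBindNone {α : Type} (g : α → (List (List Int) × List (List Int)) → Option (List (List Int) × List (List Int))) :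
    ∀ (cells : List α), cells.foldl (fun oa c => oa.bind (g c)) none = none := by
  intro cells; induction cells with
  | nil => rfl
  | cons c cs ih => simpa using ih

theorem pvOuterNone (hyperedges : List (List String)) (target_cell : String) (can_assume : List String)
    (fa : Nat) (known : List String) (used : List Int) (path : List Int) :
    ∀ (es : List (Int × List String)),
      es.foldl (fun oa ei =>
        if PySem.Set.contains used ei.1 then oa
        else ei.2.foldl
          (fun oa c => oa.bind (pvApplyA hyperedges target_cell can_assume fa known used path ei c)) oa)
        none = none := by
  intro es; induction es with
  | nil => rfl
  | cons ei es ih =>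
    rw [List.foldl_cons]
    split
    · exact ih
    · rw [pvBindNone]; exact ih

theorem pvCellStep (hyperedges : List (List String)) (target_cell : String) (can_assume : List String)
    (fa C : Nat)
    (IH : ∀ known used path a b, pvDfsA hyperedges target_cell can_assume fa known used path a = some b →
          pvRun hyperedges target_cell can_assume C [PVItem.frame known used path] a = some b)
    (known : List String) (used : List Int) (path : List Int) (ei : Int × List String) (c : String)
    (a a1 : List (List Int) × List (List Int))
    (h : pvApplyA hyperedges target_cell can_assume fa known used path ei c a = some a1) :
    pvRun hyperedges target_cell can_assume (C + 1) (pvItemsFor target_cell can_assume known used path ei c) a = some a1 := by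
  unfold pvApplyA at h
  unfold pvItemsFor
  by_cases h1 : PySem.Set.contains known c = true
  · rw [if_pos h1] at h ⊢; cases h; exact pvRun_nil _ _ _ _ _
  · rw [if_neg h1] at h ⊢
    by_cases h2 : (ei.2.filter (fun x => !(x == c))).all (fun x => PySem.Set.contains known x) = true
    · rw [if_pos h2] at h ⊢
      by_cases h3 : (c == target_cell) = true
      · rw [if_pos h3] at h ⊢
        exact IH _ _ _ _ _ h
      · rw [if_neg h3] at h ⊢
        rw [List.nil_append]
        exact pvRun_mono hyperedges target_cell can_assume C (C+1) _ _ _ (IH _ _ _ _ _ h) (by omega)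
    · rw [if_neg h2] at h ⊢
      by_cases h3 : (c == target_cell) = true
      · rw [if_pos h3] at h ⊢
        by_cases h4 : ((ei.2.filter (fun x => !(x == c))).filter (fun x => !(PySem.Set.contains known x))).all
            (fun x => PySem.Set.contains can_assume x) = true
        · rw [if_pos h4] at h ⊢; cases h; exact pvRun_nil _ _ _ _ _
        · rw [if_neg h4] at h ⊢; cases h; exact pvRun_nil _ _ _ _ _
      · rw [if_neg h3] at h ⊢; cases h; exact pvRun_nil _ _ _ _ _

theorem pvCells (hyperedges : List (List String)) (target_cell : String) (can_assume : List String)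
    (fa C : Nat)
    (IH : ∀ known used path a b, pvDfsA hyperedges target_cell can_assume fa known used path a = some b →
          pvRun hyperedges target_cell can_assume C [PVItem.frame known used path] a = some b)
    (known : List String) (used : List Int) (path : List Int) (ei : Int × List String) :
    ∀ (cells : List String) (a b : List (List Int) × List (List Int)),
      cells.foldl (fun oa c => oa.bind (pvApplyA hyperedges target_cell can_assume fa known used path ei c)) (some a) = some b →
      pvRun hyperedges target_cell can_assume (cells.length * (C + 1))
        (cells.flatMap (pvItemsFor target_cell can_assume known used path ei)) a = some b := by
  intro cells
  induction cells with
  | nil => intro a b h; cases h; exact pvRun_nil _ _ _ _ _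
  | cons c cs ih =>
    intro a b h
    rw [List.foldl_cons, Option.bind_some] at h
    cases happ : pvApplyA hyperedges target_cell can_assume fa known used path ei c a with
    | none => rw [happ, pvBindNone] at h; cases h
    | some a1 =>
      rw [happ] at h
      have hstep := pvCellStep hyperedges target_cell can_assume fa C IH known used path ei c a a1 happ
      have htail := ih a1 b h
      have hcomb := pvRun_append hyperedges target_cell can_assume (C+1) _ (cs.length * (C+1)) _ a a1 b hstep htail
      have hlen : (c :: cs).length * (C + 1) = (C + 1) + cs.length * (C + 1) := by
        simp [List.length_cons]; ring
      rw [List.flatMap_cons, hlen]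
      exact hcomb

theorem pvOuter (hyperedges : List (List String)) (target_cell : String) (can_assume : List String)
    (fa C : Nat)
    (IH : ∀ known used path a b, pvDfsA hyperedges target_cell can_assume fa known used path a = some b →
          pvRun hyperedges target_cell can_assume C [PVItem.frame known used path] a = some b)
    (known : List String) (used : List Int) (path : List Int) :
    ∀ (es : List (Int × List String)) (a b : List (List Int) × List (List Int)),
      es.foldl (fun oa ei =>
        if PySem.Set.contains used ei.1 then oa
        else ei.2.foldl
          (fun oa c => oa.bind (pvApplyA hyperedges target_cell can_assume fa known used path ei c)) oa)
        (some a) = some b →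
      pvRun hyperedges target_cell can_assume ((es.map (fun ei => ei.2.length)).sum * (C + 1))
        (es.flatMap (fun ei => if PySem.Set.contains used ei.1 then []
                               else ei.2.flatMap (pvItemsFor target_cell can_assume known used path ei))) a = some b := by
  intro es
  induction es with
  | nil => intro a b h; cases h; exact pvRun_nil _ _ _ _ _
  | cons ei es ih =>
    intro a b h
    rw [List.foldl_cons] at h
    rw [List.flatMap_cons]
    by_cases hu : PySem.Set.contains used ei.1 = true
    · rw [if_pos hu] at h ⊢
      rw [List.nil_append]
      exact pvRun_mono hyperedges target_cell can_assume _ _ _ _ _ (ih a b h)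
        (by simp only [List.map_cons, List.sum_cons]
            exact Nat.mul_le_mul_right _ (Nat.le_add_left _ _))
    · rw [if_neg hu] at h ⊢
      cases hin : ei.2.foldl (fun oa c => oa.bind (pvApplyA hyperedges target_cell can_assume fa known used path ei c)) (some a) with
      | none => rw [hin, pvOuterNone] at h; cases h
      | some a1 =>
        rw [hin] at h
        have hhead := pvCells hyperedges target_cell can_assume fa C IH known used path ei ei.2 a a1 hin
        have htail := ih a1 b h
        have hcomb := pvRun_append hyperedges target_cell can_assume _ _ _ _ a a1 b hhead htail
        have hlen : ((ei :: es).map (fun ei => ei.2.length)).sum * (C + 1) =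
            ei.2.length * (C + 1) + (es.map (fun ei => ei.2.length)).sum * (C + 1) := by
          simp [List.map_cons, List.sum_cons]; ring
        rw [hlen]
        exact hcomb

theorem pvMain (hyperedges : List (List String)) (target_cell : String) (can_assume : List String) :
    ∀ (fa : Nat) (known : List String) (used : List Int) (path : List Int)
      (a b : List (List Int) × List (List Int)),
      pvDfsA hyperedges target_cell can_assume fa known used path a = some b →
      pvRun hyperedges target_cell can_assume
        ((2 * (hyperedges.map List.length).sum + 2) ^ fa) [PVItem.frame known used path] a = some b := by
  intro fa
  induction fa with
  | zero => intro known used path a b h; simp [pvDfsA] at h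
  | succ fa ih =>
    intro known used path a b h
    rw [pvDfsA_succ] at h
    obtain ⟨m, hm⟩ : ∃ m, (2 * (hyperedges.map List.length).sum + 2) ^ (fa+1) = m + 1 :=
      ⟨(2 * (hyperedges.map List.length).sum + 2) ^ (fa+1) - 1,
       by have := Nat.one_le_pow (fa+1) (2 * (hyperedges.map List.length).sum + 2) (by omega); omega⟩
    rw [hm]
    have hstep : pvRun hyperedges target_cell can_assume (m+1) [PVItem.frame known used path] a =
        pvRun hyperedges target_cell can_assume m (pvPending hyperedges target_cell can_assume known used path ++ []) a := rfl
    rw [hstep, List.append_nil, pvPending_eq]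
    have hout := pvOuter hyperedges target_cell can_assume fa
      ((2 * (hyperedges.map List.length).sum + 2) ^ fa) ih known used path
      (PySem.List.enumerate hyperedges 0) a b h
    apply pvRun_mono hyperedges target_cell can_assume _ m _ _ _ hout
    have hmap : ((PySem.List.enumerate hyperedges 0).map (fun ei => ei.2.length)).sum =
        (hyperedges.map List.length).sum := by
      have h2 := PySem.List.map_snd_enumerate hyperedges 0
      calc ((PySem.List.enumerate hyperedges 0).map (fun ei => ei.2.length)).sum
          = (((PySem.List.enumerate hyperedges 0).map (fun ei => ei.2)).map List.length).sum := by
            rw [List.map_map]; rfl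
        _ = (hyperedges.map List.length).sum := by rw [h2]
    rw [hmap]
    set S := (hyperedges.map List.length).sum with hS
    have hC1 : 1 ≤ (2 * S + 2) ^ fa := Nat.one_le_pow _ _ (by omega)
    have hSC : S ≤ S * (2 * S + 2) ^ fa := Nat.le_mul_of_pos_right _ (by omega)
    have hpow : (2 * S + 2) ^ (fa + 1) = 2 * (S * (2 * S + 2) ^ fa) + 2 * (2 * S + 2) ^ fa := by
      rw [pow_succ]; ring
    have hexp : S * ((2 * S + 2) ^ fa + 1) = S + S * (2 * S + 2) ^ fa := by ring
    omega

theorem pvContains_add (s : List Int) (x y : Int) :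
    PySem.Set.contains (PySem.Set.add s x) y = (PySem.Set.contains s y || (y == x)) := by
  simp only [PySem.Set.contains, PySem.Set.add, List.contains_eq_mem]
  by_cases h : x ∈ s <;> simp [h] <;> by_cases h2 : y = x <;> simp [h2, h]

theorem pvFilter_lt (n : Nat) (used : List Int) (k : Nat) (hk : k < n)
    (hnc : PySem.Set.contains used (Int.ofNat k) = false) :
    ((List.range n).filter (fun i => !(PySem.Set.contains (PySem.Set.add used (Int.ofNat k)) (Int.ofNat i)))).length <
    ((List.range n).filter (fun i => !(PySem.Set.contains used (Int.ofNat i)))).length := by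
  have hfe : (List.range n).filter (fun i => !(PySem.Set.contains (PySem.Set.add used (Int.ofNat k)) (Int.ofNat i))) =
      ((List.range n).filter (fun i => !(PySem.Set.contains used (Int.ofNat i)))).filter (fun i => !(Int.ofNat i == Int.ofNat k)) := by
    rw [List.filter_filter]
    apply List.filter_congr
    intro i _
    rw [pvContains_add]
    cases hc : PySem.Set.contains used (Int.ofNat i) <;> simp
  rw [hfe, List.length_filter_lt_length_iff_exists]
  refine ⟨k, ?_, by simp⟩
  rw [List.mem_filter]
  have hnc' : Int.ofNat k ∉ used := by
    simpa [PySem.Set.contains, List.contains_eq_mem] using hnc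
  exact ⟨List.mem_range.mpr hk, by simp; exact hnc'⟩

theorem pvFoldSome {α : Type} (step : Option (List (List Int) × List (List Int)) → α → Option (List (List Int) × List (List Int))) :
    ∀ (es : List α), (∀ x ∈ es, ∀ a, ∃ y, step (some a) x = some y) →
      ∀ a, ∃ b, es.foldl step (some a) = some b := by
  intro es
  induction es with
  | nil => exact fun _ a => ⟨a, rfl⟩
  | cons x es ih =>
    intro h a
    obtain ⟨y, hy⟩ := h x (List.mem_cons_self) a
    rw [List.foldl_cons, hy]
    exact ih (fun z hz => h z (List.mem_cons_of_mem _ hz)) y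

theorem pvASuf (hyperedges : List (List String)) (target_cell : String) (can_assume : List String) :
    ∀ (fa : Nat) (known : List String) (used : List Int) (path : List Int)
      (a : List (List Int) × List (List Int)),
      ((List.range hyperedges.length).filter (fun i => !(PySem.Set.contains used (Int.ofNat i)))).length < fa →
      ∃ b, pvDfsA hyperedges target_cell can_assume fa known used path a = some b := by
  intro fa
  induction fa with
  | zero => intro known used path a h; omega
  | succ fa ih =>
    intro known used path a h
    rw [pvDfsA_succ]
    apply pvFoldSome
    intro ei hei x
    by_cases hu : PySem.Set.contains used ei.1 = true
    · exact ⟨x, by rw [if_pos hu]⟩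
    · rw [if_neg hu]
      apply pvFoldSome
      intro c _ y
      obtain ⟨k, hk, hei1⟩ : ∃ k : Nat, k < hyperedges.length ∧ ei.1 = Int.ofNat k := by
        obtain ⟨k, hk, rfl⟩ := (PySem.List.mem_enumerate_iff hyperedges 0 ei).mp hei
        exact ⟨k, hk, by simp⟩
      have hu' : PySem.Set.contains used (Int.ofNat k) = false := by
        rw [← hei1]; exact Bool.eq_false_iff.mpr hu
      have hlt := pvFilter_lt hyperedges.length used k hk hu'
      show ∃ z, (some y).bind (pvApplyA hyperedges target_cell can_assume fa known used path ei c) = some z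
      simp only [Option.bind_some]
      unfold pvApplyA
      split_ifs
      all_goals first
        | exact ⟨_, rfl⟩
        | exact ih _ _ _ _ (by rw [hei1]; omega)


-- ===== VERDICT (by name: the statement is the Claim_ definition above) =====
theorem find_inference_paths_str_spec : Claim_equal_find_inference_paths_str := by
  intro hyperedges target_cell initial_known _ hpre
  unfold Spec_find_inference_paths_str
  cases initial_known with
  | none => simp [Pre_find_inference_paths_str] at hpre
  | some ik =>
    obtain ⟨b, hb⟩ := pvASuf hyperedges target_cell
      (PySem.Set.diff (PySem.Set.diff (hyperedges.foldl (fun s e => PySem.Set.update s e) PySem.Set.empty) ik) [target_cell])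
      (hyperedges.length + 1) (PySem.Set.ofList ik) PySem.Set.empty [] ([], PySem.Set.empty)
      (by exact Nat.lt_succ_of_le (by simpa using List.length_filter_le _ _))
    have hr := pvMain hyperedges target_cell
      (PySem.Set.diff (PySem.Set.diff (hyperedges.foldl (fun s e => PySem.Set.update s e) PySem.Set.empty) ik) [target_cell])
      (hyperedges.length + 1) (PySem.Set.ofList ik) PySem.Set.empty [] ([], PySem.Set.empty) b hb
    simp only [find_inference_paths_str, find_inference_paths_str_alt, hb, hr]
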